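-- pv_equiv track=rewrite | github.com/ltfafei/py_Leetcode_study | aKindOfQuestion/5.arithmeticRobot.py | arithRobot
-- ===== SOURCE A (Python) =====
-- def arithRobot(x, y, s):
--     n = 0
--     for c in s:
--         if c == "A":
--             n += 2 * x + y
--         else:
--             n += 2 * y + x
--     return n
-- ===== SOURCE B (Python) =====
-- def arithRobot(x, y, s):
--     return len(s) * (x + 2 * y) + s.count("A") * (x - y)
-- ===== Notes on version B (the rewrite author's own statement) =====
-- stated objective: simpler
-- what changed: Replaces the per-character accumulation loop by a closed-form arithmetic expression len(s)*(x+2y) + s.count('A')*(x-y), with no explicit loop or branch.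
import Mathlib
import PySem

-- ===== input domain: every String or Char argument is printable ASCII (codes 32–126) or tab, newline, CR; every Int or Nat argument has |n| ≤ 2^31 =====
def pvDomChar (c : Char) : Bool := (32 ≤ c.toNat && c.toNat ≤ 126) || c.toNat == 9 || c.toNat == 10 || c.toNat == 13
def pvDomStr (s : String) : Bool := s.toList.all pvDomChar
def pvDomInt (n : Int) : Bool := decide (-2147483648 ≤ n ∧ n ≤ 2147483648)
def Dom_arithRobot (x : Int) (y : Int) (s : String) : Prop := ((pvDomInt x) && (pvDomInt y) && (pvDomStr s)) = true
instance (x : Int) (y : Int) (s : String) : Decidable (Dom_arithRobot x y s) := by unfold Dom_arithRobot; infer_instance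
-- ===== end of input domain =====

-- B replaces A's per-character accumulation loop by a closed-form arithmetic expression (objective: simpler).

-- ===== PORT A =====
-- n = 0; for c in s: n += 2*x+y if c == 'A' else 2*y+x; return n
def arithRobot (x : Int) (y : Int) (s : String) : Int :=
  s.toList.foldl (fun n c => if c == 'A' then n + (2 * x + y) else n + (2 * y + x)) 0

-- ===== PORT B =====
-- return len(s) * (x + 2*y) + s.count("A") * (x - y)
def arithRobot_alt (x : Int) (y : Int) (s : String) : Int :=
  (PySem.Str.len s) * (x + 2 * y) + ((PySem.Str.count s "A" : Int)) * (x - y)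

-- ===== PRECONDITION & SPEC =====
def Spec_arithRobot (x : Int) (y : Int) (s : String) (out : Int) : Prop := out = arithRobot_alt x y s
instance (x : Int) (y : Int) (s : String) (out : Int) : Decidable (Spec_arithRobot x y s out) := by unfold Spec_arithRobot; infer_instance

-- ===== CLAIM (what is proved, stated in full; the proofs are below) =====
def Claim_equal_arithRobot : Prop := ∀ (x : Int) (y : Int) (s : String), Dom_arithRobot x y s → Spec_arithRobot x y s (arithRobot x y s)

-- ===== LEMMAS AND PROOFS =====
-- Python s.count("A") for a single-character pattern is the plain character count.
theorem count_go_single (l : List Char) (fuel acc : Nat) (h : l.length ≤ fuel) :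
    PySem.Chars.count.go ['A'] fuel l acc = acc + l.count 'A' := by
  induction l generalizing fuel acc with
  | nil => cases fuel <;> simp [PySem.Chars.count.go]
  | cons c t ih =>
    cases fuel with
    | zero => simp at h
    | succ f =>
      simp only [List.length_cons, Nat.succ_le_succ_iff] at h
      by_cases hc : c = 'A'
      · subst hc
        simp [PySem.Chars.count.go, List.isPrefixOf, ih f (acc + 1) h]
        omega
      · simp [PySem.Chars.count.go, List.isPrefixOf, hc, Ne.symm hc, ih f acc h]

theorem chars_count_A (l : List Char) : PySem.Chars.count l ['A'] = l.count 'A' := by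
  simp [PySem.Chars.count, count_go_single l l.length 0 le_rfl]

theorem arithRobot_foldl_closed (x y : Int) (l : List Char) (n0 : Int) :
    l.foldl (fun n c => if c == 'A' then n + (2 * x + y) else n + (2 * y + x)) n0
      = n0 + (l.length : Int) * (x + 2 * y) + (l.count 'A' : Int) * (x - y) := by
  induction l generalizing n0 with
  | nil => simp
  | cons c t ih =>
    rw [List.foldl_cons, ih]
    by_cases h : c = 'A' <;> simp [h] <;> ring

-- ===== VERDICT (by name: the statement is the Claim_ definition above) =====
theorem arithRobot_spec : Claim_equal_arithRobot := by
  intro x y s _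
  unfold Spec_arithRobot arithRobot arithRobot_alt
  rw [arithRobot_foldl_closed]
  simp [PySem.Str.len_eq, PySem.Str.count_eq, chars_count_A]
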